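-- pv_equiv track=rewrite | github.com/johndimm/comics-sales | app/main.py | pick_cover_photo
-- ===== SOURCE A (Python) =====
-- def pick_cover_photo(urls: list[str]):
--     for u in urls:
--         lu = u.lower()
--         if any(x in lu for x in ["/front", "_front", "front.", " cover", "-f.", "f.jpg", "f.jpeg", "f.png"]):
--             return u
--     for u in urls:
--         lu = u.lower()
--         if any(x in lu for x in ["back", "_b.", "-b.", "pinup", "inside", "rear"]):
--             continue
--         return u
--     return urls[0] if urls else None
-- ===== SOURCE B (Python) =====
-- FRONT_PATTERNS = ["/front", "_front", "front.", " cover", "-f.", "f.jpg", "f.jpeg", "f.png"]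
-- BACK_PATTERNS = ["back", "_b.", "-b.", "pinup", "inside", "rear"]
--
-- def pick_cover_photo(urls: list[str]):
--     fallback = None
--     for u in urls:
--         lu = u.lower()
--         if any(x in lu for x in FRONT_PATTERNS):
--             return u
--         if fallback is None and not any(x in lu for x in BACK_PATTERNS):
--             fallback = u
--     if fallback is not None:
--         return fallback
--     return urls[0] if urls else None
-- ===== Notes on version B (the rewrite author's own statement) =====
-- stated objective: simpler
-- what changed: Fuses A's two separate scans (first for a front-pattern match, then for the first non-back URL) into a single left-to-right pass that returns a front match immediately and remembers the first non-back URL as a fallback.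
import Mathlib
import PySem

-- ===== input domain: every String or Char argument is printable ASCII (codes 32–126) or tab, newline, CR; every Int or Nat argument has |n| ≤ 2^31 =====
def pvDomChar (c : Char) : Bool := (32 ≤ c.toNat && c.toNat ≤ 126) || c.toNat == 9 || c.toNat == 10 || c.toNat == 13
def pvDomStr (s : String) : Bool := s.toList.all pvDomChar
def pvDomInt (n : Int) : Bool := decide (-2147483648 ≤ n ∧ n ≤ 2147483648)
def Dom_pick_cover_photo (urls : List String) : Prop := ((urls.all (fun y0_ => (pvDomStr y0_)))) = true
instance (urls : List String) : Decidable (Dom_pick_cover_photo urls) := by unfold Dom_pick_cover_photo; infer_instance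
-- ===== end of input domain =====

-- B fuses A's two scans into one left-to-right pass with a fallback accumulator (objective: simpler).

-- ===== PORT A =====
def frontPats : List String := ["/front", "_front", "front.", " cover", "-f.", "f.jpg", "f.jpeg", "f.png"]
def backPats : List String := ["back", "_b.", "-b.", "pinup", "inside", "rear"]

-- A's first loop: return the first URL whose lowercase contains a front pattern
def pickFront : List String → Option String
  | [] => none
  | u :: rest =>
    let lu := PySem.Str.lower u
    if frontPats.any (fun x => PySem.Str.isIn x lu) then some u else pickFront rest

-- A's second loop: return the first URL whose lowercase contains no back pattern
def pickNonBack : List String → Option String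
  | [] => none
  | u :: rest =>
    let lu := PySem.Str.lower u
    if backPats.any (fun x => PySem.Str.isIn x lu) then pickNonBack rest else some u

def pick_cover_photo (urls : List String) : Option String :=
  match pickFront urls with
  | some u => some u
  | none =>
    match pickNonBack urls with
    | some u => some u
    | none => match urls with
      | [] => none
      | u :: _ => some u

-- ===== PORT B =====
-- B's single loop: early return on a front match; fallback = first non-back URL seen
def altLoop : List String → Option String → Option String
  | [], fallback => fallback
  | u :: rest, fallback =>
    let lu := PySem.Str.lower u
    if frontPats.any (fun x => PySem.Str.isIn x lu) then some u
    else altLoop rest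
      (if fallback.isNone && !(backPats.any (fun x => PySem.Str.isIn x lu)) then some u
       else fallback)

def pick_cover_photo_alt (urls : List String) : Option String :=
  match altLoop urls none with
  | some u => some u
  | none => urls.head?

-- ===== PRECONDITION & SPEC =====
def Spec_pick_cover_photo (urls : List String) (out : Option String) : Prop := out = pick_cover_photo_alt urls
instance (urls : List String) (out : Option String) : Decidable (Spec_pick_cover_photo urls out) := by unfold Spec_pick_cover_photo; infer_instance

-- ===== CLAIM (what is proved, stated in full; the proofs are below) =====
def Claim_equal_pick_cover_photo : Prop := ∀ (urls : List String), Dom_pick_cover_photo urls → Spec_pick_cover_photo urls (pick_cover_photo urls)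

-- ===== LEMMAS AND PROOFS =====
theorem altLoop_eq (urls : List String) (fb : Option String) :
    altLoop urls fb =
      match pickFront urls with
      | some u => some u
      | none => match fb with
        | some v => some v
        | none => pickNonBack urls := by
  induction urls generalizing fb with
  | nil => cases fb <;> simp [altLoop, pickFront, pickNonBack]
  | cons u rest ih =>
    simp only [altLoop, pickFront, pickNonBack]
    split_ifs with h1 h2 h3 h4 h5 <;> cases fb <;>
      simp_all [ih, Option.isNone] <;>
      · exfalso
        obtain ⟨x, hx, hxt⟩ := h4
        simp [h3 x hx] at hxt

-- ===== VERDICT (by name: the statement is the Claim_ definition above) =====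
theorem pick_cover_photo_spec : Claim_equal_pick_cover_photo := by
  intro urls _
  unfold Spec_pick_cover_photo pick_cover_photo pick_cover_photo_alt
  rw [altLoop_eq]
  cases h1 : pickFront urls with
  | some u => simp
  | none =>
    cases h2 : pickNonBack urls with
    | some u => simp
    | none => cases urls <;> simp
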